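-- pv_equiv track=rewrite | github.com/irfy2k321/Leetcode-progress | 1496-lucky-numbers-in-a-matrix/1496-lucky-numbers-in-a-matrix.py | luckyNumbers
-- ===== SOURCE A (Python) =====
-- from typing import List
--
-- def luckyNumbers(matrix: List[List[int]]) -> List[int]:
--     # Find the minimum element in each row
--     min_in_rows = [min(row) for row in matrix]
--
--     # Transpose the matrix to get columns easily
--     transposed_matrix = list(zip(*matrix))
--
--     # Find the maximum element in each column
--     max_in_cols = [max(col) for col in transposed_matrix]
--
--     # Find all lucky numbers (elements that are minimum in their row and maximum in their column)
--     lucky_numbers = []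
--     for i in range(len(matrix)):
--         for j in range(len(matrix[0])):
--             if matrix[i][j] == min_in_rows[i] and matrix[i][j] == max_in_cols[j]:
--                 lucky_numbers.append(matrix[i][j])
--
--     return lucky_numbers
-- ===== SOURCE B (Python) =====
-- from typing import List
--
-- def luckyNumbers(matrix: List[List[int]]) -> List[int]:
--     # Naive double scan: recompute the row minimum and column maximum at each cell.
--     lucky = []
--     for i in range(len(matrix)):
--         row = matrix[i]
--         for j in range(len(matrix[0])):
--             v = row[j]
--             if v == min(row) and v == max(matrix[r][j] for r in range(len(matrix))):
--                 lucky.append(v)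
--     return lucky
-- ===== Notes on version B (the rewrite author's own statement) =====
-- stated objective: simpler
-- what changed: B drops A's precomputed row-min list, transpose and column-max list and instead does a naive double scan that recomputes min(row) and the column maximum (a generator over the rows) on demand at each cell.
import Mathlib
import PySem

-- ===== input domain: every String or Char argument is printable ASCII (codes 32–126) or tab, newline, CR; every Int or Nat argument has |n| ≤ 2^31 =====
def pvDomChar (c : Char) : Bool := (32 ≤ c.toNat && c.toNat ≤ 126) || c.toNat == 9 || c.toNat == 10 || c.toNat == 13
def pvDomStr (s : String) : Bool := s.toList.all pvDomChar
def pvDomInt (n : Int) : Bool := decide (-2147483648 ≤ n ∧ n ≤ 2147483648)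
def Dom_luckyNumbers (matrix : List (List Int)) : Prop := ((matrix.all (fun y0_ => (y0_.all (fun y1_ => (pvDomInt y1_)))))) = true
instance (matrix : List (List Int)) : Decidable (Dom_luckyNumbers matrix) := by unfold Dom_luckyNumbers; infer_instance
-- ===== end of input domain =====

-- B drops A's precomputed row-min list, transpose and column-max list and instead
-- recomputes the row minimum and the column maximum on demand at every cell (simpler, not faster).

-- ===== PORT A =====
-- zip(*matrix): all heads of the rows, or none if some row is exhausted
def pvAllHeads : List (List Int) → Option (List Int × List (List Int))
  | [] => some ([], [])
  | [] :: _ => none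
  | (h :: t) :: rest =>
    match pvAllHeads rest with
    | none => none
    | some (hs, ts) => some (h :: hs, t :: ts)

def pvZipGo : List Int → List (List Int) → List (List Int)
  | [], _ => []
  | h :: t, rest =>
    match pvAllHeads rest with
    | none => []
    | some (hs, ts) => (h :: hs) :: pvZipGo t ts

-- list(zip(*matrix)) (tuples modelled as lists; exact: stops at the shortest row)
def pvZipStar : List (List Int) → List (List Int)
  | [] => []
  | r :: rs => pvZipGo r rs

-- min(row)/max(col) raise on [], excluded by Pre_; indexing is in range under Pre_ (pyGetD)
def luckyNumbers (matrix : List (List Int)) : List Int :=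
  let minInRows := matrix.map (fun row => (PySem.List.min? row (fun x => x)).getD 0)
  let transposed := pvZipStar matrix
  let maxInCols := transposed.map (fun col => (PySem.List.max? col (fun x => x)).getD 0)
  (PySem.List.pyRange 0 (matrix.length : Int) 1).foldl (fun acc i =>
    (PySem.List.pyRange 0 ((PySem.List.pyGetD matrix 0 []).length : Int) 1).foldl (fun acc j =>
      let v := PySem.List.pyGetD (PySem.List.pyGetD matrix i []) j 0
      if v = PySem.List.pyGetD minInRows i 0 ∧ v = PySem.List.pyGetD maxInCols j 0
      then acc ++ [v] else acc) acc) []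

-- ===== PORT B =====
def luckyNumbers_alt (matrix : List (List Int)) : List Int :=
  (PySem.List.pyRange 0 (matrix.length : Int) 1).foldl (fun acc i =>
    let row := PySem.List.pyGetD matrix i []
    (PySem.List.pyRange 0 ((PySem.List.pyGetD matrix 0 []).length : Int) 1).foldl (fun acc j =>
      let v := PySem.List.pyGetD row j 0
      if v = (PySem.List.min? row (fun x => x)).getD 0 ∧
         v = (PySem.List.max? ((PySem.List.pyRange 0 (matrix.length : Int) 1).map
                (fun r => PySem.List.pyGetD (PySem.List.pyGetD matrix r []) j 0)) (fun x => x)).getD 0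
      then acc ++ [v] else acc) acc) []

-- ===== PRECONDITION & SPEC =====
-- Exactly where the Python A returns: every row nonempty (min(row) raises ValueError on an
-- empty row) and row 0 no longer than any row (otherwise matrix[i][j]/max_in_cols[j] raises
-- IndexError). The empty matrix is admitted: both loops are skipped and A returns [].
def Pre_luckyNumbers (matrix : List (List Int)) : Prop :=
  ∀ row ∈ matrix, row ≠ [] ∧ matrix.headI.length ≤ row.length
instance (matrix : List (List Int)) : Decidable (Pre_luckyNumbers matrix) := by unfold Pre_luckyNumbers; infer_instance

def pvWitness_luckyNumbers : List (List Int) := [[3, 7, 8], [9, 11, 13], [15, 16, 17]]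

def Spec_luckyNumbers (matrix : List (List Int)) (out : List Int) : Prop := out = luckyNumbers_alt matrix
instance (matrix : List (List Int)) (out : List Int) : Decidable (Spec_luckyNumbers matrix out) := by unfold Spec_luckyNumbers; infer_instance

-- ===== CLAIM (what is proved, stated in full; the proofs are below) =====
def Claim_equal_luckyNumbers : Prop := ∀ (matrix : List (List Int)), Dom_luckyNumbers matrix → Pre_luckyNumbers matrix → Spec_luckyNumbers matrix (luckyNumbers matrix)

-- ===== LEMMAS AND PROOFS =====

lemma pvAllHeads_eq (rs : List (List Int)) (h : ∀ x ∈ rs, x ≠ []) :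
    pvAllHeads rs = some (rs.map (fun x => x.headD 0), rs.map List.tail) := by
  induction rs with
  | nil => rfl
  | cons r rest ih =>
    cases r with
    | nil => exact absurd rfl (h [] (by simp))
    | cons a b =>
      simp [pvAllHeads, ih (fun x hx => h x (by simp [hx]))]

lemma pvZipGo_eq (r : List Int) (rs : List (List Int))
    (h : ∀ x ∈ rs, r.length ≤ x.length) :
    pvZipGo r rs = (List.range r.length).map
      (fun j => (r :: rs).map (fun row => row.getD j 0)) := by
  induction r generalizing rs with
  | nil => simp [pvZipGo]
  | cons a t ih =>
    have hne : ∀ x ∈ rs, x ≠ [] := by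
      intro x hx hnil
      have := h x hx
      rw [hnil] at this; simp at this
    have htl : ∀ x ∈ rs.map List.tail, t.length ≤ x.length := by
      intro x hx
      rcases List.mem_map.mp hx with ⟨y, hy, rfl⟩
      have hlen := h y hy
      simp only [List.length_tail, List.length_cons] at *
      omega
    rw [pvZipGo, pvAllHeads_eq rs hne]
    dsimp only
    rw [ih (rs.map List.tail) htl]
    simp only [List.length_cons, List.range_succ_eq_map, List.map_cons, List.map_map]
    congr 1
    · congr 1
      apply List.map_congr_left
      intro x _
      cases x <;> rfl
    · apply List.map_congr_left
      intro j _
      simp only [Function.comp]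
      congr 1
      apply List.map_congr_left
      intro x _
      cases x <;> rfl

lemma pvZipStar_eq (matrix : List (List Int)) (hpre : Pre_luckyNumbers matrix) :
    pvZipStar matrix = (List.range matrix.headI.length).map
      (fun j => matrix.map (fun row => row.getD j 0)) := by
  cases matrix with
  | nil => rfl
  | cons r rs =>
    have : ∀ x ∈ rs, r.length ≤ x.length := by
      intro x hx
      exact (hpre x (by simp [hx])).2
    simpa using pvZipGo_eq r rs this

-- ===== VERDICT (by name: the statement is the Claim_ definition above) =====
theorem luckyNumbers_spec : Claim_equal_luckyNumbers := by
  intro matrix _ hpre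
  unfold Spec_luckyNumbers luckyNumbers luckyNumbers_alt
  apply PySem.List.foldl_congr_mem
  intro acc i hi
  rcases (PySem.List.mem_pyRange_one).mp hi with ⟨hi0, hin⟩
  apply PySem.List.foldl_congr_mem
  intro acc2 j hj
  rcases (PySem.List.mem_pyRange_one).mp hj with ⟨hj0, hjn⟩
  have hin' : i.toNat < matrix.length := by omega
  -- the row picked at index i
  have hrow : PySem.List.pyGetD matrix i [] = matrix[i.toNat] :=
    PySem.List.pyGetD_eq_getElem matrix [] hi0 (by exact_mod_cast hin)
  have hmem : matrix[i.toNat] ∈ matrix := List.getElem_mem hin'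
  -- length of row 0 bound for j
  have hjn' : j.toNat < matrix.headI.length := by
    have h0 : PySem.List.pyGetD matrix 0 [] = matrix.headI := by
      cases matrix with
      | nil => simp at hin'
      | cons a b => simp [PySem.List.pyGetD_zero_cons]
    rw [h0] at hjn; omega
  -- row minimum agrees
  have hmin : PySem.List.pyGetD (matrix.map (fun row => (PySem.List.min? row (fun x => x)).getD 0)) i 0
      = (PySem.List.min? (PySem.List.pyGetD matrix i []) (fun x => x)).getD 0 := by
    rw [hrow, PySem.List.pyGetD_eq_getElem _ 0 hi0 (by simpa using hin)]
    simp
  -- column maximum agrees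
  have hcol : PySem.List.pyGetD
      ((pvZipStar matrix).map (fun col => (PySem.List.max? col (fun x => x)).getD 0)) j 0
      = (PySem.List.max? ((PySem.List.pyRange 0 (matrix.length : Int) 1).map
          (fun r => PySem.List.pyGetD (PySem.List.pyGetD matrix r []) j 0)) (fun x => x)).getD 0 := by
    rw [pvZipStar_eq matrix hpre]
    rw [PySem.List.pyGetD_eq_getElem _ 0 hj0
      (by simp only [List.length_map, List.length_range]; omega)]
    simp only [List.getElem_map, List.getElem_range]
    congr 2
    -- the j-th column equals B's generator list (read right-to-left)
    have h2 := PySem.List.map_pyGetD_pyRange_zero (xs := matrix) (d := ([] : List Int))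
    simp only [PySem.List.len_eq] at h2
    have hmapr : (PySem.List.pyRange 0 (matrix.length : Int) 1).map
        (fun r => PySem.List.pyGetD (PySem.List.pyGetD matrix r []) j 0)
        = matrix.map (fun row => PySem.List.pyGetD row j 0) := by
      conv_rhs => rw [← h2, List.map_map]
      rfl
    rw [hmapr]
    apply List.map_congr_left
    intro row _
    rw [PySem.List.pyGetD_of_nonneg row 0 hj0]
  rw [hmin, hcol]
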